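-- pv_equiv track=rewrite | github.com/CodingTest-lab/Algorithm.Prac | 프로그래머스/unrated/120883. 로그인 성공？/로그인 성공？.py | solution
-- ===== SOURCE A (Python) =====
-- def solution(id_pw, db):
--     db_keys = [key for key,value in db]
--     db_values = [value for key,value in db]
--
--     for i in range (len(db)):
--         if id_pw[0] == db_keys[i] and id_pw[1] == db_values[i]:
--             return 'login'
--         elif id_pw[0] == db_keys[i] and id_pw[1] != db_values[i]:
--             return 'wrong pw'
--         elif id_pw[0] != db_keys[i]:
--             continue
--     return 'fail'
-- ===== SOURCE B (Python) =====
-- def solution(id_pw, db):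
--     if id_pw[:2] in db:
--         return 'login'
--     if any(k == id_pw[0] for k, v in db):
--         return 'wrong pw'
--     return 'fail'
-- ===== Notes on version B (the rewrite author's own statement) =====
-- stated objective: idiomatic
-- what changed: Replaces A's indexed branch-by-branch scan over parallel key/value lists with two staged whole-list membership tests: exact-pair membership id_pw[:2] in db decides 'login', then key membership decides 'wrong pw' vs 'fail' -- B never locates or compares the matching row itself.
-- outside the precondition, e.g. on solution(['a', 'b'], [['a', 'x'], ['a', 'b']]): A returns 'wrong pw', B returns 'login'
import Mathlib
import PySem

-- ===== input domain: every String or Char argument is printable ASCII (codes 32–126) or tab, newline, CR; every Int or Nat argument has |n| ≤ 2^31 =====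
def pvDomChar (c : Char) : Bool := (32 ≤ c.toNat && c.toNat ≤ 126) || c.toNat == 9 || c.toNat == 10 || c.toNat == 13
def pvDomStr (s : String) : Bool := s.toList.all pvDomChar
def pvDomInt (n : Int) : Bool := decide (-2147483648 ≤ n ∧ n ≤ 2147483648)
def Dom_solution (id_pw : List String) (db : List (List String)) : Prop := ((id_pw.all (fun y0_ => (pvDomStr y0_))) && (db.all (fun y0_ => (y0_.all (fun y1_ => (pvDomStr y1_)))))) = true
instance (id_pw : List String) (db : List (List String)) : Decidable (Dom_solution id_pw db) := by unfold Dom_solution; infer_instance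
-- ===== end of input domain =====

-- B decides 'login' by whole-pair membership (id_pw[:2] in db) and 'wrong pw' by key
-- membership, instead of A's branching scan over parallel lists — idiomatic, same O(n).

-- ===== PORT A =====
-- the 'for i in range(len(db))' scan over the two parallel lists, branch for branch
def solutionGo (id0 id1 : String) : List String → List String → String
  | k :: ks, v :: vs =>
    if id0 == k && id1 == v then "login"
    else if id0 == k && !(id1 == v) then "wrong pw"
    else solutionGo id0 id1 ks vs
  | _, _ => "fail"

def solution (id_pw : List String) (db : List (List String)) : String :=
  let db_keys := db.map (fun e => ((PySem.List.pyGet? e 0).getD ""))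
  let db_values := db.map (fun e => ((PySem.List.pyGet? e 1).getD ""))
  solutionGo ((PySem.List.pyGet? id_pw 0).getD "") ((PySem.List.pyGet? id_pw 1).getD "")
    db_keys db_values

-- ===== PORT B =====
def solution_alt (id_pw : List String) (db : List (List String)) : String :=
  if db.contains (PySem.List.slice id_pw none (some 2)) then "login"
  else if db.any (fun e => ((PySem.List.pyGet? e 0).getD "") == ((PySem.List.pyGet? id_pw 0).getD "")) then "wrong pw"
  else "fail"

-- ===== PRECONDITION & SPEC =====
-- Pre_ excludes (a) db rows not of length exactly 2 (both Pythons raise ValueError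
-- unpacking them), (b) id_pw with fewer than two entries when db is nonempty except
-- the case id_pw = [x] with x not among the keys (on the excluded short id_pw A raises
-- IndexError), and (c) the duplicate-id corner where the row id_pw[:2] occurs in db but
-- is not the FIRST row carrying that id — there A's first-match rule says 'wrong pw'
-- while B's pair membership says 'login', both defensible on duplicate ids.
def Pre_solution (id_pw : List String) (db : List (List String)) : Prop :=
  (∀ e ∈ db, e.length = 2) ∧
  ([((PySem.List.pyGet? id_pw 0).getD ""), ((PySem.List.pyGet? id_pw 1).getD "")] ∈ db →
    db.find? (fun e => ((PySem.List.pyGet? e 0).getD "") == ((PySem.List.pyGet? id_pw 0).getD "")) =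
      some [((PySem.List.pyGet? id_pw 0).getD ""), ((PySem.List.pyGet? id_pw 1).getD "")]) ∧
  (2 ≤ id_pw.length ∨ db = [] ∨
    (id_pw.length = 1 ∧ ((PySem.List.pyGet? id_pw 0).getD "") ∉ db.map (fun e => ((PySem.List.pyGet? e 0).getD ""))))
instance (id_pw : List String) (db : List (List String)) : Decidable (Pre_solution id_pw db) := by unfold Pre_solution; infer_instance

def pvWitness_solution : List String × List (List String) := (["a", "b"], [["a", "b"], ["c", "d"]])

def Spec_solution (id_pw : List String) (db : List (List String)) (out : String) : Prop := out = solution_alt id_pw db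
instance (id_pw : List String) (db : List (List String)) (out : String) : Decidable (Spec_solution id_pw db out) := by unfold Spec_solution; infer_instance

-- ===== CLAIM (what is proved, stated in full; the proofs are below) =====
def Claim_equal_solution : Prop := ∀ (id_pw : List String) (db : List (List String)), Dom_solution id_pw db → Pre_solution id_pw db → Spec_solution id_pw db (solution id_pw db)

-- ===== LEMMAS AND PROOFS =====

-- abbreviations used only by the proofs
def keyOf (e : List String) : String := (PySem.List.pyGet? e 0).getD ""
def valOf (e : List String) : String := (PySem.List.pyGet? e 1).getD ""

theorem solution_eq (id_pw : List String) (db : List (List String)) :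
    solution id_pw db =
      solutionGo ((PySem.List.pyGet? id_pw 0).getD "") ((PySem.List.pyGet? id_pw 1).getD "")
        (db.map keyOf) (db.map valOf) := rfl

theorem solution_alt_eq (id_pw : List String) (db : List (List String)) :
    solution_alt id_pw db =
      (if db.contains (PySem.List.slice id_pw none (some 2)) then "login"
       else if db.any (fun e => keyOf e == ((PySem.List.pyGet? id_pw 0).getD "")) then "wrong pw"
       else "fail") := rfl

-- rows of length 2 are literal pairs
theorem row_eta (e : List String) (h : e.length = 2) : e = [keyOf e, valOf e] := by
  match e, h with
  | [k, v], _ => rfl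

-- main case: id_pw has at least two entries, so id_pw[:2] = [id0, id1]; the hypothesis
-- hf says the pair, if present, is the first row carrying its id
theorem main_two (id0 id1 : String) :
    ∀ (db : List (List String)), (∀ e ∈ db, e.length = 2) →
      ([id0, id1] ∈ db → db.find? (fun e => keyOf e == id0) = some [id0, id1]) →
      solutionGo id0 id1 (db.map keyOf) (db.map valOf) =
        (if db.contains [id0, id1] then "login"
         else if db.any (fun e => keyOf e == id0) then "wrong pw" else "fail") := by
  intro db
  induction db with
  | nil => intro _ _; simp [solutionGo]
  | cons e rest ih =>
    intro h2 hf
    have he : e = [keyOf e, valOf e] := row_eta e (h2 e (by simp))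
    simp only [List.map_cons, solutionGo, List.contains_cons, List.any_cons]
    by_cases hk : id0 = keyOf e
    · by_cases hv : id1 = valOf e
      · simp [hk, hv, he.symm]
      · -- key matches, pw differs: the pair cannot occur later (e would precede it)
        have hne : ¬ ([id0, id1] = e) := by
          rw [he]; simp [hv]
        have hnm : [id0, id1] ∉ rest := by
          intro hmem
          have := hf (by simp [hmem])
          rw [List.find?_cons_of_pos (by simp [hk])] at this
          exact hne (by injection this with h; exact h.symm)
        simp only [hk] at hne hnm
        simp [hk, hv, List.contains_eq_mem, hne, hnm]
    · -- key differs: head contributes nothing to either side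
      have hne : ¬ ([id0, id1] = e) := by
        rw [he]; simp; intro h; exact absurd h hk
      have hfr : [id0, id1] ∈ rest → rest.find? (fun e => keyOf e == id0) = some [id0, id1] := by
        intro hmem
        have := hf (by simp [hmem])
        rwa [List.find?_cons_of_neg (by simp [Ne.symm hk])] at this
      have := ih (fun x hx => h2 x (by simp [hx])) hfr
      simp only [List.contains_eq_mem] at this ⊢
      simp [hk, Ne.symm hk, hne, this]

-- no-key-match case: A's scan falls through to 'fail'
theorem go_fail (id0 id1 : String) :
    ∀ (db : List (List String)), id0 ∉ db.map keyOf →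
      solutionGo id0 id1 (db.map keyOf) (db.map valOf) = "fail" := by
  intro db
  induction db with
  | nil => intro _; simp [solutionGo]
  | cons e rest ih =>
    intro h
    simp only [List.map_cons, List.mem_cons, not_or] at h
    simp only [List.map_cons, solutionGo]
    have : ¬ (id0 == keyOf e) = true := by simpa using h.1
    simp [this, ih h.2]

-- a short prefix is never a length-2 row
theorem short_not_mem (xs : List String) (db : List (List String))
    (hlen : xs.length < 2) (h2 : ∀ e ∈ db, e.length = 2) : xs ∉ db := by
  intro hmem
  have := h2 xs hmem
  omega

-- ===== VERDICT (by name: the statement is the Claim_ definition above) =====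
theorem solution_spec : Claim_equal_solution := by
  intro id_pw db _ hpre
  obtain ⟨h2, hnd, hcase⟩ := hpre
  unfold Spec_solution
  rw [solution_eq, solution_alt_eq]
  match id_pw, hcase with
  | a :: b :: t, _ =>
    have hsl : PySem.List.slice (a :: b :: t) none (some 2) = [a, b] := by
      rw [show ((2:Int) = ((2:Nat):Int)) from rfl, PySem.List.slice_to_natCast]; rfl
    have h0 : ((PySem.List.pyGet? (a :: b :: t) 0).getD "") = a := by simp [pysem]
    have h1 : ((PySem.List.pyGet? (a :: b :: t) 1).getD "") = b := by simp [pysem]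
    rw [hsl, h0, h1]
    refine main_two a b db h2 ?_
    intro hmem
    have := hnd (by simpa [h0, h1] using hmem)
    simpa [keyOf, h0, h1] using this
  | id_pw, Or.inr hc =>
    rcases hc with hdb | ⟨hl1, hnk⟩
    · subst hdb; cases id_pw <;> simp [solutionGo]
    · have hnk' : ((PySem.List.pyGet? id_pw 0).getD "") ∉ db.map keyOf := by
        simpa [keyOf] using hnk
      have hnm : PySem.List.slice id_pw none (some 2) ∉ db := by
        apply short_not_mem _ _ _ h2
        rw [show ((2:Int) = ((2:Nat):Int)) from rfl, PySem.List.slice_to_natCast]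
        simp [hl1]
      have hany : ¬ (db.any (fun e => keyOf e == ((PySem.List.pyGet? id_pw 0).getD ""))) = true := by
        simp only [List.any_eq_true, not_exists]
        intro e
        simp only [beq_iff_eq, not_and]
        intro he hk
        exact hnk' (hk ▸ List.mem_map_of_mem he)
      rw [go_fail _ _ db hnk']
      simp only [List.contains_eq_mem] at hnm ⊢
      simp [hnm, hany]
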